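-- pv_equiv track=rewrite | github.com/mateobarajas-globant/dojo_24 | Split_list_by_Pivot_04_10.py | split_list_by_pivot
-- ===== SOURCE A (Python) =====
-- def split_list_by_pivot(list, pivot):
--     if not list:
--         return [[], []]
--
--     smaller, greater = split_list_by_pivot(list[1:], pivot)
--
--     if list[0] < pivot:
--         smaller.append(list[0])
--     else:
--         greater.append(list[0])
--     return [smaller, greater]
-- ===== SOURCE B (Python) =====
-- def split_list_by_pivot(list, pivot):
--     smaller, greater = [], []
--     for x in reversed(list):
--         (smaller if x < pivot else greater).append(x)
--     return [smaller, greater]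
-- ===== Notes on version B (the rewrite author's own statement) =====
-- stated objective: faster
-- what changed: Replaced the recursion that slices list[1:] at every level and appends after returning with a single iterative pass over reversed(list) accumulating the two partitions directly.
import Mathlib
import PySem

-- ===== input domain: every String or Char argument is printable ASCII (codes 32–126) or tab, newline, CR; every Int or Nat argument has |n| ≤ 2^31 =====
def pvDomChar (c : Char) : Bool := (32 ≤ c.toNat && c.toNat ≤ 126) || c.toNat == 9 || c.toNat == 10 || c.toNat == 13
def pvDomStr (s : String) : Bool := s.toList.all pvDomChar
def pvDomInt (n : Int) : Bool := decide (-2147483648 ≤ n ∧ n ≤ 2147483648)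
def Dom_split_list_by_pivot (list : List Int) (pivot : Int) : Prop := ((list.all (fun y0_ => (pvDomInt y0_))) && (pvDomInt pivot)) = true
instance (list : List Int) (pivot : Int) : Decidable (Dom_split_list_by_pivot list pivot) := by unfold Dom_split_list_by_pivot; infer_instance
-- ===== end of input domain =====

-- B replaces A's recursive slice-and-append-after-return (O(n^2)) with one iterative pass over the reversed list (O(n)); same return value.

-- ===== PORT A =====
-- A recurses on list[1:] then appends list[0] to one of the two returned lists.
def split_list_by_pivot (list : List Int) (pivot : Int) : List (List Int) :=
  match list with
  | [] => [[], []]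
  | x :: rest =>
    let r := split_list_by_pivot rest pivot
    let smaller := r.getD 0 []
    let greater := r.getD 1 []
    if x < pivot then [smaller ++ [x], greater]
    else [smaller, greater ++ [x]]

-- ===== PORT B =====
-- B: single fold over list.reverse, appending each element to one of two accumulators.
def split_list_by_pivot_alt (list : List Int) (pivot : Int) : List (List Int) :=
  let acc := list.reverse.foldl
    (fun (acc : List Int × List Int) x =>
      if x < pivot then (acc.1 ++ [x], acc.2) else (acc.1, acc.2 ++ [x]))
    ([], [])
  [acc.1, acc.2]

-- ===== PRECONDITION & SPEC =====
def Spec_split_list_by_pivot (list : List Int) (pivot : Int) (out : List (List Int)) : Prop := out = split_list_by_pivot_alt list pivot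
instance (list : List Int) (pivot : Int) (out : List (List Int)) : Decidable (Spec_split_list_by_pivot list pivot out) := by unfold Spec_split_list_by_pivot; infer_instance

-- ===== CLAIM (what is proved, stated in full; the proofs are below) =====
def Claim_equal_split_list_by_pivot : Prop := ∀ (list : List Int) (pivot : Int), Dom_split_list_by_pivot list pivot → Spec_split_list_by_pivot list pivot (split_list_by_pivot list pivot)

-- ===== LEMMAS AND PROOFS =====

-- A's result is the pair of accumulators of B's fold, as a two-element list.
theorem split_eq_fold (list : List Int) (pivot : Int) :
    split_list_by_pivot list pivot =
      [(list.reverse.foldl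
          (fun (acc : List Int × List Int) x =>
            if x < pivot then (acc.1 ++ [x], acc.2) else (acc.1, acc.2 ++ [x]))
          ([], [])).1,
       (list.reverse.foldl
          (fun (acc : List Int × List Int) x =>
            if x < pivot then (acc.1 ++ [x], acc.2) else (acc.1, acc.2 ++ [x]))
          ([], [])).2] := by
  induction list with
  | nil => simp [split_list_by_pivot]
  | cons x rest ih =>
    simp only [split_list_by_pivot, ih, List.reverse_cons, List.foldl_append, List.foldl_cons,
      List.foldl_nil, List.getD]
    by_cases h : x < pivot <;> simp [h]

-- ===== VERDICT (by name: the statement is the Claim_ definition above) =====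
theorem split_list_by_pivot_spec : Claim_equal_split_list_by_pivot := by
  intro list pivot _
  unfold Spec_split_list_by_pivot split_list_by_pivot_alt
  exact split_eq_fold list pivot
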